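-- pv_equiv track=rewrite | github.com/dazzlingwuming/Automatic-Revision-Skill-for-Anonymous-Paper-Review | scripts/parse_revision_plan_markdown.py | _subsections
-- ===== SOURCE A (Python) =====
-- def _subsections(section: str) -> list[tuple[str, str]]:
--     result: list[tuple[str, str]] = []
--     current_title: str | None = None
--     current_lines: list[str] = []
--     for line in section.splitlines():
--         if line.startswith("### "):
--             if current_title is not None:
--                 result.append((current_title, "\n".join(current_lines).strip()))
--             current_title = line[4:].strip()
--             current_lines = []
--         elif current_title is not None:
--             current_lines.append(line)
--     if current_title is not None:
--         result.append((current_title, "\n".join(current_lines).strip()))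
--     return result
-- ===== SOURCE B (Python) =====
-- def _subsections(section: str) -> list[tuple[str, str]]:
--     lines = section.splitlines()
--     heads = [(i, line) for i, line in enumerate(lines) if line.startswith("### ")]
--     result: list[tuple[str, str]] = []
--     for j, (start, line) in enumerate(heads):
--         end = heads[j + 1][0] if j + 1 < len(heads) else len(lines)
--         result.append((line[4:].strip(), "\n".join(lines[start + 1:end]).strip()))
--     return result
-- ===== Notes on version B (the rewrite author's own statement) =====
-- stated objective: alternative
-- what changed: Replaced A's single-pass accumulator state machine (current_title/current_lines carried through the loop) with a two-pass structure: first collect the positions of all header lines via enumerate, then slice the line range between consecutive headers.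
import Mathlib
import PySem

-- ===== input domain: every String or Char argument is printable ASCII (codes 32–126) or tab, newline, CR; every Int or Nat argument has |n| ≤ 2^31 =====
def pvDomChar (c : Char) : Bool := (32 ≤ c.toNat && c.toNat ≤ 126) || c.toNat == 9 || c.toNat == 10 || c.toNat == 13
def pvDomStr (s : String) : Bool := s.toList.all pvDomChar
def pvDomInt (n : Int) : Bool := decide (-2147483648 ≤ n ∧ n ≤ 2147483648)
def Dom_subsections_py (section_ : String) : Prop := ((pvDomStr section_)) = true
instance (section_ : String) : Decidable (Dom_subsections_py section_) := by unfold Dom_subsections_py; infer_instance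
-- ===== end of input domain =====

-- B replaces A's single-pass accumulator state machine by a two-pass find-header-positions-then-slice decomposition (objective: alternative; same cost).

-- ===== PORT A =====
-- loop body of A's for-statement over the state (result, current_title, current_lines)
def pvStepA (st : List (String × String) × Option String × List String) (line : String) :
    List (String × String) × Option String × List String :=
  if PySem.Str.startswith line "### " then
    let result := match st.2.1 with
      | some t => st.1 ++ [(t, PySem.Str.strip (PySem.Str.join "\n" st.2.2))]
      | none => st.1
    (result, some (PySem.Str.strip (PySem.Str.slice line (some 4))), [])
  else
    match st.2.1 with
    | some _ => (st.1, st.2.1, st.2.2 ++ [line])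
    | none => st

def subsections_py (section_ : String) : List (String × String) :=
  let fin := (PySem.Str.splitlines section_).foldl pvStepA ([], none, [])
  match fin.2.1 with
  | some t => fin.1 ++ [(t, PySem.Str.strip (PySem.Str.join "\n" fin.2.2))]
  | none => fin.1

-- ===== PORT B =====
-- the for-loop of B: each header (index, line) paired with the next header index (or len(lines)) as end
def pvBuildB (lines : List String) : List (Int × String) → List (String × String)
  | [] => []
  | (start, line) :: rest =>
    let endIdx : Int := match rest with
      | (next, _) :: _ => next
      | [] => (lines.length : Int)
    (PySem.Str.strip (PySem.Str.slice line (some 4)),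
     PySem.Str.strip (PySem.Str.join "\n" (PySem.List.slice lines (some (start + 1)) (some endIdx))))
      :: pvBuildB lines rest

def subsections_py_alt (section_ : String) : List (String × String) :=
  let lines := PySem.Str.splitlines section_
  let heads := (PySem.List.enumerate lines).filter (fun p => PySem.Str.startswith p.2 "### ")
  pvBuildB lines heads

-- ===== PRECONDITION & SPEC =====
def Spec_subsections_py (section_ : String) (out : List (String × String)) : Prop := out = subsections_py_alt section_
instance (section_ : String) (out : List (String × String)) : Decidable (Spec_subsections_py section_ out) := by unfold Spec_subsections_py; infer_instance

-- ===== CLAIM (what is proved, stated in full; the proofs are below) =====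
def Claim_equal_subsections_py : Prop := ∀ (section_ : String), Dom_subsections_py section_ → Spec_subsections_py section_ (subsections_py section_)

-- ===== LEMMAS AND PROOFS =====

-- common reference shape: structural recursion on the line list
def pvSpec : List String → List (String × String)
  | [] => []
  | l :: rest =>
    if PySem.Str.startswith l "### " then
      (PySem.Str.strip (PySem.Str.slice l (some 4)),
       PySem.Str.strip (PySem.Str.join "\n" (rest.takeWhile (fun x => !PySem.Str.startswith x "### "))))
        :: pvSpec (rest.dropWhile (fun x => !PySem.Str.startswith x "### "))
    else pvSpec rest
termination_by ls => ls.length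
decreasing_by
  · exact Nat.lt_succ_of_le (List.length_dropWhile_le _ _)
  · simp

-- the trailing `if current_title is not None` of A
def pvFinA (st : List (String × String) × Option String × List String) : List (String × String) :=
  match st.2.1 with
  | some t => st.1 ++ [(t, PySem.Str.strip (PySem.Str.join "\n" st.2.2))]
  | none => st.1

theorem pvA_some (lines : List String) : ∀ (result : List (String × String)) (t : String) (cur : List String),
    pvFinA (lines.foldl pvStepA (result, some t, cur))
      = result ++ (t, PySem.Str.strip (PySem.Str.join "\n" (cur ++ lines.takeWhile (fun x => !PySem.Str.startswith x "### "))))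
          :: pvSpec (lines.dropWhile (fun x => !PySem.Str.startswith x "### ")) := by
  induction lines with
  | nil => intro result t cur; simp [pvFinA, pvSpec]
  | cons l rest ih =>
    intro result t cur
    by_cases h : PySem.Str.startswith l "### " = true
    all_goals have h' := h; simp at h'
    · simp only [List.foldl_cons, pvStepA, h, if_pos, List.takeWhile_cons, List.dropWhile_cons]
      rw [ih]
      simp [pvSpec, h']
    · simp only [List.foldl_cons, pvStepA, h, List.takeWhile_cons, List.dropWhile_cons]
      rw [if_neg (by simp [h])]
      rw [ih]
      simp [h']

theorem pvA_none (lines : List String) : ∀ (result : List (String × String)) (cur : List String),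
    pvFinA (lines.foldl pvStepA (result, none, cur)) = result ++ pvSpec lines := by
  induction lines with
  | nil => intro result cur; simp [pvFinA, pvSpec]
  | cons l rest ih =>
    intro result cur
    by_cases h : PySem.Str.startswith l "### " = true
    all_goals have h' := h; simp at h'
    · simp only [List.foldl_cons, pvStepA, h, if_pos]
      rw [pvA_some]
      simp [pvSpec, h']
    · simp only [List.foldl_cons, pvStepA, h]
      rw [if_neg (by simp [h])]
      rw [ih]
      simp [pvSpec, h']

theorem pvA_eq_spec (s : String) : subsections_py s = pvSpec (PySem.Str.splitlines s) := by
  show pvFinA ((PySem.Str.splitlines s).foldl pvStepA ([], none, [])) = _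
  rw [pvA_none]; rfl

-- ---- B side ----

def pvHd (ls : List String) : List (Int × String) :=
  (PySem.List.enumerate ls).filter (fun p => PySem.Str.startswith p.2 "### ")

theorem pvB_eq_build (s : String) :
    subsections_py_alt s = pvBuildB (PySem.Str.splitlines s) (pvHd (PySem.Str.splitlines s)) := rfl

theorem pvHd_shift (ls : List String) : ∀ (n : Int),
    ((PySem.List.enumerate ls n).filter (fun p => PySem.Str.startswith p.2 "### "))
      = (pvHd ls).map (fun p => (p.1 + n, p.2)) := by
  induction ls with
  | nil => intro n; simp [PySem.List.enumerate_nil, pvHd]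
  | cons l rest ih =>
    intro n
    unfold pvHd
    rw [PySem.List.enumerate_cons, PySem.List.enumerate_cons]
    rw [List.filter_cons, List.filter_cons]
    by_cases h : PySem.Str.startswith l "### " = true
    · rw [if_pos h, if_pos h, ih (n + 1), ih (0 + 1)]
      simp only [List.map_cons, List.map_map, zero_add]
      congr 1
      apply List.map_congr_left; intro p _
      simp only [Function.comp, Prod.mk.injEq]
      exact ⟨by omega, trivial⟩
    · rw [if_neg h, if_neg h, ih (n + 1), ih (0 + 1)]
      simp only [List.map_map, zero_add]
      apply List.map_congr_left; intro p _
      simp only [Function.comp, Prod.mk.injEq]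
      exact ⟨by omega, trivial⟩

theorem pvHd_cons (l : String) (rest : List String) :
    pvHd (l :: rest)
      = (if PySem.Str.startswith l "### " then [((0 : Int), l)] else [])
          ++ (pvHd rest).map (fun p => (p.1 + 1, p.2)) := by
  unfold pvHd
  rw [PySem.List.enumerate_cons]
  by_cases h : PySem.Str.startswith l "### " = true
  · simp only [List.filter_cons, h, if_pos]
    rw [pvHd_shift rest (0 + 1)]
    simp [pvHd]
  · simp only [List.filter_cons, h]
    rw [pvHd_shift rest (0 + 1)]
    simp [pvHd]

theorem pvHd_nonneg (ls : List String) : ∀ p ∈ pvHd ls, 0 ≤ p.1 := by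
  intro p hp
  have hm := List.mem_of_mem_filter hp
  rw [PySem.List.mem_enumerate_iff] at hm
  obtain ⟨k, hk, rfl⟩ := hm
  simp

theorem pvSliceShift (l : String) (lines : List String) (a e : Int) (h0 : 0 ≤ a) (he : 0 ≤ e) :
    PySem.List.slice (l :: lines) (some (a + 1 + 1)) (some (e + 1))
      = PySem.List.slice lines (some (a + 1)) (some e) := by
  rw [PySem.List.slice_toNat _ (by omega) (by omega), PySem.List.slice_toNat _ (by omega) he]
  have h1 : (a + 1 + 1).toNat = (a + 1).toNat + 1 := by omega
  have h2 : (e + 1).toNat - ((a + 1).toNat + 1) = e.toNat - (a + 1).toNat := by omega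
  rw [h1, h2, List.drop_succ_cons]

theorem pvShift1 (l : String) (lines : List String) : ∀ (hs : List (Int × String)),
    (∀ p ∈ hs, 0 ≤ p.1) →
    pvBuildB (l :: lines) (hs.map (fun p => (p.1 + 1, p.2))) = pvBuildB lines hs := by
  intro hs
  induction hs with
  | nil => intro _; simp [pvBuildB]
  | cons p rest ih =>
    intro hnn
    obtain ⟨start, line⟩ := p
    have h0 : (0 : Int) ≤ start := hnn (start, line) (by simp)
    cases rest with
    | nil =>
      simp only [List.map_cons, List.map_nil, pvBuildB]
      have hcast : ((l :: lines).length : Int) = (lines.length : Int) + 1 := by simp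
      rw [hcast, pvSliceShift l lines start (lines.length : Int) h0 (by positivity)]
    | cons q rest' =>
      obtain ⟨next, x⟩ := q
      have hq0 : (0 : Int) ≤ next := hnn (next, x) (by simp)
      have ihr := ih (fun r hr => hnn r (by simp [hr]))
      simp only [List.map_cons] at ihr
      show (PySem.Str.strip (PySem.Str.slice line (some 4)),
            PySem.Str.strip (PySem.Str.join "\n"
              (PySem.List.slice (l :: lines) (some (start + 1 + 1)) (some (next + 1)))))
          :: pvBuildB (l :: lines) ((next + 1, x) :: rest'.map (fun p => (p.1 + 1, p.2)))
        = _
      rw [ihr, pvSliceShift l lines start next h0 hq0]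
      rfl

theorem pvShiftMany : ∀ (pre lines : List String) (hs : List (Int × String)),
    (∀ p ∈ hs, 0 ≤ p.1) →
    pvBuildB (pre ++ lines) (hs.map (fun p => (p.1 + (pre.length : Int), p.2))) = pvBuildB lines hs := by
  intro pre
  induction pre with
  | nil =>
    intro lines hs _
    simp
  | cons x pre' ih =>
    intro lines hs hnn
    have hmap : hs.map (fun p => (p.1 + ((x :: pre').length : Int), p.2))
        = (hs.map (fun p => (p.1 + (pre'.length : Int), p.2))).map (fun p => (p.1 + 1, p.2)) := by
      rw [List.map_map]
      apply List.map_congr_left; intro p _; simp [Function.comp]; omega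
    rw [hmap, List.cons_append]
    rw [pvShift1 x (pre' ++ lines) _ (by
      intro p hp
      rw [List.mem_map] at hp
      obtain ⟨q, hq, rfl⟩ := hp
      have := hnn q hq
      simp; omega)]
    exact ih lines hs hnn

theorem pvDropWhileHead {α : Type} (p : α → Bool) :
    ∀ (l : List α) (d : α) (dt : List α), l.dropWhile p = d :: dt → p d = false := by
  intro l
  induction l with
  | nil => intro d dt h; simp [List.dropWhile] at h
  | cons x l' ih =>
    intro d dt h
    by_cases hx : p x = true
    · rw [List.dropWhile_cons_of_pos hx] at h
      exact ih d dt h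
    · rw [List.dropWhile_cons_of_neg (by simp [hx])] at h
      cases h
      simp [hx]

theorem pvSpec_nil : pvSpec [] = [] := by rw [pvSpec]

theorem pvSpec_cons (l : String) (rest : List String) :
    pvSpec (l :: rest) = if PySem.Str.startswith l "### " then
      (PySem.Str.strip (PySem.Str.slice l (some 4)),
       PySem.Str.strip (PySem.Str.join "\n" (rest.takeWhile (fun x => !PySem.Str.startswith x "### "))))
        :: pvSpec (rest.dropWhile (fun x => !PySem.Str.startswith x "### "))
    else pvSpec rest := by
  rw [pvSpec]

theorem pvHd_nil : pvHd [] = [] := by simp [pvHd, PySem.List.enumerate_nil]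

theorem pvBuildB_single (lines : List String) (s : Int) (x : String) :
    pvBuildB lines [(s, x)]
      = [(PySem.Str.strip (PySem.Str.slice x (some 4)),
          PySem.Str.strip (PySem.Str.join "\n"
            (PySem.List.slice lines (some (s + 1)) (some (lines.length : Int)))))] := rfl

theorem pvBuildB_cons_cons (lines : List String) (s : Int) (x : String) (s2 : Int) (x2 : String)
    (rest : List (Int × String)) :
    pvBuildB lines ((s, x) :: (s2, x2) :: rest)
      = (PySem.Str.strip (PySem.Str.slice x (some 4)),
         PySem.Str.strip (PySem.Str.join "\n"
           (PySem.List.slice lines (some (s + 1)) (some s2))))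
          :: pvBuildB lines ((s2, x2) :: rest) := rfl

theorem pvB_main : ∀ (n : Nat) (lines : List String), lines.length ≤ n →
    pvBuildB lines (pvHd lines) = pvSpec lines := by
  intro n
  induction n with
  | zero =>
    intro lines hlen
    cases lines with
    | nil => rw [pvHd_nil, pvSpec_nil]; rfl
    | cons l rest => simp at hlen
  | succ n ih =>
    intro lines hlen
    cases lines with
    | nil => rw [pvHd_nil, pvSpec_nil]; rfl
    | cons l rest =>
      simp only [List.length_cons, Nat.succ_le_succ_iff] at hlen
      rw [pvHd_cons, pvSpec_cons]
      by_cases h : PySem.Str.startswith l "### " = true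
      · -- header line
        rw [if_pos h, if_pos h]
        simp only [List.singleton_append]
        set tw := rest.takeWhile (fun x => !PySem.Str.startswith x "### ") with htw
        set dw := rest.dropWhile (fun x => !PySem.Str.startswith x "### ") with hdw
        have hdecomp : tw ++ dw = rest := List.takeWhile_append_dropWhile
        have hHdRest : pvHd rest = (pvHd dw).map (fun p => (p.1 + (tw.length : Int), p.2)) := by
          conv_lhs => rw [← hdecomp]
          unfold pvHd
          rw [PySem.List.enumerate_append, List.filter_append]
          have htwnil : (PySem.List.enumerate tw 0).filter (fun p => PySem.Str.startswith p.2 "### ") = [] := by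
            rw [List.filter_eq_nil_iff]
            intro p hp
            rw [PySem.List.mem_enumerate_iff] at hp
            obtain ⟨k, hk, rfl⟩ := hp
            have hmem : tw[k] ∈ List.takeWhile (fun x => !PySem.Str.startswith x "### ") rest := by
              rw [← htw]; exact List.getElem_mem hk
            have := List.mem_takeWhile_imp hmem
            simpa using this
          rw [htwnil, List.nil_append, pvHd_shift]
          apply List.map_congr_left; intro p _
          simp only [Prod.mk.injEq]
          exact ⟨by omega, trivial⟩
        have hlen2 : dw.length ≤ n := by
          have := List.length_dropWhile_le (fun x => !PySem.Str.startswith x "### ") rest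
          rw [← hdw] at this
          omega
        cases hdwc : dw with
        | nil =>
          have hrest : tw = rest := by rw [← hdecomp, hdwc, List.append_nil]
          rw [hHdRest, hdwc, pvHd_nil, List.map_nil, List.map_nil, pvBuildB_single, pvSpec_nil]
          have hslice : PySem.List.slice (l :: rest) (some (0 + 1)) (some ((l :: rest).length : Int)) = rest := by
            rw [PySem.List.slice_toNat _ (by omega) (by positivity)]
            simp
          rw [hslice, hrest]
        | cons d dt =>
          have hd_head : PySem.Str.startswith d "### " = true := by
            have h2 := pvDropWhileHead (fun x => !PySem.Str.startswith x "### ") rest d dt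
              (by rw [← hdw]; exact hdwc)
            simpa using h2
          have hHdDw : pvHd dw = ((0 : Int), d) :: (pvHd dt).map (fun p => (p.1 + 1, p.2)) := by
            rw [hdwc, pvHd_cons, if_pos hd_head, List.singleton_append]
          have hlist : (pvHd rest).map (fun p : Int × String => (p.1 + 1, p.2))
              = ((tw.length : Int) + 1, d)
                  :: (pvHd dt).map (fun p => (p.1 + ((tw.length : Int) + 2), p.2)) := by
            rw [hHdRest, hHdDw]
            simp only [List.map_cons, List.map_map]
            rw [List.cons.injEq]
            constructor
            · simp only [Prod.mk.injEq]
              exact ⟨by omega, trivial⟩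
            · apply List.map_congr_left; intro p _
              simp only [Function.comp, Prod.mk.injEq]
              exact ⟨by omega, trivial⟩
          rw [hlist, pvBuildB_cons_cons, List.cons.injEq]
          constructor
          · -- first pair: body is tw
            have hslice : PySem.List.slice (l :: rest) (some (0 + 1)) (some ((tw.length : Int) + 1)) = tw := by
              rw [PySem.List.slice_toNat _ (by omega) (by positivity)]
              have h1 : ((0 : Int) + 1).toNat = 1 := by omega
              have h2 : ((tw.length : Int) + 1).toNat - 1 = tw.length := by omega
              rw [h1, h2, List.drop_one, List.tail_cons, ← hdecomp]
              have h3 : tw.length = tw.length + 0 := by omega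
              rw [h3, List.take_append]
              simp
            rw [hslice]
          · -- tail
            have htail : ((tw.length : Int) + 1, d)
                  :: (pvHd dt).map (fun p => (p.1 + ((tw.length : Int) + 2), p.2))
                = (pvHd dw).map (fun p => (p.1 + (((l :: tw).length : Nat) : Int), p.2)) := by
              rw [hHdDw]
              simp only [List.map_cons, List.map_map, List.length_cons]
              rw [List.cons.injEq]
              constructor
              · simp only [Prod.mk.injEq]
                refine ⟨by push_cast; omega, trivial⟩
              · apply List.map_congr_left; intro p _
                simp only [Function.comp, Prod.mk.injEq]
                refine ⟨by push_cast; omega, trivial⟩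
            have hl : l :: rest = (l :: tw) ++ dw := by rw [← hdecomp]; rfl
            rw [htail, hl, pvShiftMany (l :: tw) dw (pvHd dw) (pvHd_nonneg dw)]
            rw [hdwc] at hlen2 ⊢
            exact ih (d :: dt) hlen2
      · -- non-header line
        rw [if_neg h, if_neg h, List.nil_append]
        rw [pvShift1 l rest (pvHd rest) (pvHd_nonneg rest)]
        exact ih rest hlen

-- ===== VERDICT (by name: the statement is the Claim_ definition above) =====
theorem subsections_py_spec : Claim_equal_subsections_py := by
  intro s _
  show subsections_py s = subsections_py_alt s
  rw [pvA_eq_spec, pvB_eq_build, pvB_main (PySem.Str.splitlines s).length _ le_rfl]
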